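-- pv_equiv track=rewrite | github.com/maxkapur/blockify.py | blockify.py | _bresenham_alternator
-- ===== SOURCE A (Python) =====
-- def _bresenham_alternator(x, y, n):
--     # Iterator for determining whether to perform a horizontal or vertical
--     # split in proportion to the image's aspect ratio. If the image is
--     # tall (x > y), returns False more often than True (i.e. fewer vertical splits).
--
--     # Based on Bresenham's line algorithm.
--
--     flip = x < y
--     x, y = (y, x) if flip else (x, y)
--
--     v = y
--     for _ in range(n):
--         v += y
--         if v > x:
--             yield not flip
--             v -= x
--         else:
--             yield flip
-- ===== SOURCE B (Python) =====
-- def _bresenham_alternator(x, y, n):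
--     # Stateless re-implementation: after the same swap, the i-th element is
--     # determined directly by whether the floor-division count floor((m*lo-1)/hi)
--     # increments between m=i+1 and m=i+2 -- no error accumulator is carried.
--     flip = x < y
--     hi, lo = (y, x) if flip else (x, y)
--     if lo <= 0:
--         # the accumulator in the classic algorithm never overflows here
--         yield from [flip] * n
--         return
--     for i in range(n):
--         yield flip != (((i + 2) * lo - 1) // hi > ((i + 1) * lo - 1) // hi)
-- ===== Notes on version B (the rewrite author's own statement) =====
-- stated objective: alternative
-- what changed: Replaces A's incremental Bresenham error-accumulator loop (v += y; conditionally v -= x, branching on the carried state) with a stateless per-index formula: element i is flip XOR (floor(((i+2)*lo-1)/hi) > floor(((i+1)*lo-1)/hi)), plus an explicit all-flip branch when the smaller dimension is <= 0.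
import Mathlib
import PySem

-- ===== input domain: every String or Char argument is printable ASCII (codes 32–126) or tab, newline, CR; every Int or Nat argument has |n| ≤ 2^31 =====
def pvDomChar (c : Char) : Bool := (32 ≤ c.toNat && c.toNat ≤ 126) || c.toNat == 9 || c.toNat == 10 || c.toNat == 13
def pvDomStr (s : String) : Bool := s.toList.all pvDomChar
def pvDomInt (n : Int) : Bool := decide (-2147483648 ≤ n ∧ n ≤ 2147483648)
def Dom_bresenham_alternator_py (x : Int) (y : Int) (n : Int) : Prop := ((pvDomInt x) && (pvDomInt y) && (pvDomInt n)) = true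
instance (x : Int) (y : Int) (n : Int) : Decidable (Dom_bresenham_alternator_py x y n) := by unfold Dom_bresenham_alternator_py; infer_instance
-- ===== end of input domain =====

-- B replaces A's incremental error-accumulator loop by a stateless per-index
-- floor-division formula (alternative decomposition, same cost).

-- ===== PORT A =====
-- the `for _ in range(n)` loop carrying the error accumulator v
def pvLoopA (flip : Bool) (x y : Int) (v : Int) : Nat → List Bool
  | 0 => []
  | Nat.succ k =>
    let v' := v + y
    if v' > x then (!flip) :: pvLoopA flip x y (v' - x) k
    else flip :: pvLoopA flip x y v' k

def bresenham_alternator_py (x : Int) (y : Int) (n : Int) : List Bool :=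
  let flip := decide (x < y)
  let p := if flip then (y, x) else (x, y)
  pvLoopA flip p.1 p.2 p.2 n.toNat

-- ===== PORT B =====
def bresenham_alternator_py_alt (x : Int) (y : Int) (n : Int) : List Bool :=
  let flip := decide (x < y)
  let p := if flip then (y, x) else (x, y)
  let hi := p.1
  let lo := p.2
  if lo ≤ 0 then List.replicate n.toNat flip
  else (PySem.List.pyRange 0 n 1).map (fun i =>
    flip != decide (PySem.Int.floordiv ((i + 2) * lo - 1) hi
                      > PySem.Int.floordiv ((i + 1) * lo - 1) hi))

-- ===== PRECONDITION & SPEC =====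
def Spec_bresenham_alternator_py (x : Int) (y : Int) (n : Int) (out : List Bool) : Prop := out = bresenham_alternator_py_alt x y n
instance (x : Int) (y : Int) (n : Int) (out : List Bool) : Decidable (Spec_bresenham_alternator_py x y n out) := by unfold Spec_bresenham_alternator_py; infer_instance

-- ===== CLAIM (what is proved, stated in full; the proofs are below) =====
def Claim_equal_bresenham_alternator_py : Prop := ∀ (x : Int) (y : Int) (n : Int), Dom_bresenham_alternator_py x y n → Spec_bresenham_alternator_py x y n (bresenham_alternator_py x y n)

-- ===== LEMMAS AND PROOFS =====

-- bracket characterisation of floordiv for a positive divisor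
lemma pvF_bounds (a x : Int) (hx : 0 < x) :
    (PySem.Int.floordiv (a - 1) x) * x ≤ a - 1 ∧ a - 1 < (PySem.Int.floordiv (a - 1) x + 1) * x :=
  (PySem.Int.floordiv_eq_iff_of_pos (a := a - 1) (b := x) hx).mp rfl

-- when y ≤ 0 the accumulator can never exceed x, so A yields only `flip`
lemma pvLoopA_const (flip : Bool) (x y : Int) (hy : y ≤ 0) :
    ∀ (k : Nat) (v : Int), v ≤ x → pvLoopA flip x y v k = List.replicate k flip := by
  intro k
  induction k with
  | zero => intro v _; rfl
  | succ k ih =>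
    intro v hv
    have h1 : ¬ (v + y > x) := by omega
    simp only [pvLoopA]
    rw [if_neg h1, List.replicate_succ]
    exact congrArg _ (ih (v + y) (by omega))

-- the invariant: A's accumulator before step with index i-1 is
-- i*y - floordiv(i*y - 1, x)*x, and the remaining k steps produce exactly
-- B's per-index values for indices i-1, i, …
lemma pvLoop_key (flip : Bool) (x y : Int) (hy : 0 < y) (hyx : y ≤ x) :
    ∀ (k : Nat) (i : Int), 1 ≤ i →
      pvLoopA flip x y (i * y - (PySem.Int.floordiv (i * y - 1) x) * x) k
        = (PySem.List.pyRange (i - 1) (i - 1 + k) 1).map (fun t =>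
            flip != decide (PySem.Int.floordiv ((t + 2) * y - 1) x
                              > PySem.Int.floordiv ((t + 1) * y - 1) x)) := by
  have hx : 0 < x := by omega
  intro k
  induction k with
  | zero =>
    intro i _
    rw [show i - 1 + (0 : Nat) = i - 1 by push_cast; ring,
      PySem.List.pyRange_one_eq_nil (le_refl _)]
    rfl
  | succ k ih =>
    intro i hi
    set a := i * y with ha
    set q := PySem.Int.floordiv (a - 1) x with hq
    set q' := PySem.Int.floordiv (a + y - 1) x with hq'
    obtain ⟨hb1, hb2⟩ := pvF_bounds a x hx
    obtain ⟨hc1, hc2⟩ := pvF_bounds (a + y) x hx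
    rw [← hq] at hb1 hb2
    rw [show a + y - 1 = (a + y) - 1 by ring] at hc1 hc2
    rw [show PySem.Int.floordiv (a + y - 1) x = q' from rfl] at hc1 hc2
    have hqq : q ≤ q' := by nlinarith
    have hqq2 : q' ≤ q + 1 := by nlinarith
    have hcond : (a - q * x + y > x) ↔ (q' > q) := by
      constructor
      · intro h; nlinarith
      · intro h; nlinarith
    have hrange : PySem.List.pyRange (i - 1) (i - 1 + (k + 1 : Nat)) 1
        = (i - 1) :: PySem.List.pyRange i (i + k) 1 := by
      rw [show (((k + 1 : Nat) : Int)) = (k : Int) + 1 by push_cast; ring,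
        PySem.List.pyRange_one_cons (by omega),
        show i - 1 + 1 = i by ring,
        show i - 1 + ((k : Int) + 1) = i + k by ring]
    have hheadc : (flip != decide (PySem.Int.floordiv ((i - 1 + 2) * y - 1) x
                      > PySem.Int.floordiv ((i - 1 + 1) * y - 1) x))
        = (if a - q * x + y > x then !flip else flip) := by
      have e1 : (i - 1 + 2) * y - 1 = (a + y) - 1 := by rw [ha]; ring
      have e2 : (i - 1 + 1) * y - 1 = a - 1 := by rw [ha]; ring
      rw [e1, e2]
      rw [show PySem.Int.floordiv (a + y - 1) x = q' from rfl, ← hq]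
      by_cases h : a - q * x + y > x
      · rw [if_pos h]
        have hlt : q < q' := hcond.mp h
        cases flip <;> simp [gt_iff_lt, hlt]
      · rw [if_neg h]
        have hnlt : ¬ (q < q') := fun hg => h (hcond.mpr hg)
        cases flip <;> simp [gt_iff_lt, hnlt]
    have hnext : ∀ (Q : Int), Q = q' →
        pvLoopA flip x y ((i + 1) * y - Q * x) k
          = (PySem.List.pyRange i (i + k) 1).map (fun t =>
              flip != decide (PySem.Int.floordiv ((t + 2) * y - 1) x
                                > PySem.Int.floordiv ((t + 1) * y - 1) x)) := by
      intro Q hQ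
      have hq'f : Q = PySem.Int.floordiv ((i + 1) * y - 1) x := by
        rw [hQ, hq', ha]; congr 1; ring
      rw [hq'f]
      have := ih (i + 1) (by omega)
      rw [show i + 1 - 1 = i by ring] at this
      rw [show i + (k : Int) = i + 1 - 1 + k by ring] at this
      rw [show i + (k : Int) = i + 1 - 1 + k by ring]
      exact this
    simp only [pvLoopA]
    rw [hrange, List.map_cons, hheadc]
    by_cases h : a - q * x + y > x
    · rw [if_pos (show a - q * x + y > x from h), if_pos h]
      refine congrArg _ ?_
      have hq'eq : q' = q + 1 := by have := hcond.mp h; omega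
      have harg : a - q * x + y - x = (i + 1) * y - q' * x := by
        rw [hq'eq, ha]; ring
      rw [show i * y - q * x + y - x = a - q * x + y - x by rw [ha], harg]
      exact hnext q' rfl
    · rw [if_neg (show ¬ (a - q * x + y > x) from h), if_neg h]
      refine congrArg _ ?_
      have hq'eq : q' = q := by
        have : ¬ (q' > q) := fun hg => h (hcond.mpr hg)
        omega
      have harg : a - q * x + y = (i + 1) * y - q' * x := by
        rw [hq'eq, ha]; ring
      rw [show i * y - q * x + y = a - q * x + y by rw [ha], harg]
      exact hnext q' rfl

-- both ports, in the post-swap shape Y ≤ X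
lemma pvLoop_main (flip : Bool) (X Y n : Int) (h : Y ≤ X) :
    pvLoopA flip X Y Y n.toNat
      = if Y ≤ 0 then List.replicate n.toNat flip
        else (PySem.List.pyRange 0 n 1).map (fun i =>
          flip != decide (PySem.Int.floordiv ((i + 2) * Y - 1) X
                            > PySem.Int.floordiv ((i + 1) * Y - 1) X)) := by
  by_cases hY : Y ≤ 0
  · rw [if_pos hY]
    exact pvLoopA_const flip X Y hY n.toNat Y (by omega)
  · rw [if_neg hY]
    have hY' : 0 < Y := by omega
    have hx : 0 < X := by omega
    have hq0 : PySem.Int.floordiv (Y - 1) X = 0 := by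
      exact (PySem.Int.floordiv_eq_iff_of_pos (a := Y - 1) (b := X) hx).mpr
        (by constructor <;> nlinarith)
    have key := pvLoop_key flip X Y hY' h n.toNat 1 (le_refl 1)
    rw [show (1 : Int) * Y - 1 = Y - 1 by ring, hq0] at key
    simp only [zero_mul, one_mul, sub_zero] at key
    rw [show (1 : Int) - 1 = 0 by ring] at key
    rw [key]
    by_cases hn : n ≤ 0
    · rw [PySem.List.pyRange_one_eq_nil (by omega : n ≤ 0),
        PySem.List.pyRange_one_eq_nil (by omega : (0 : Int) + n.toNat ≤ 0)]
    · congr 2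
      omega

-- ===== VERDICT (by name: the statement is the Claim_ definition above) =====
theorem bresenham_alternator_py_spec : Claim_equal_bresenham_alternator_py := by
  intro x y n _
  unfold Spec_bresenham_alternator_py bresenham_alternator_py bresenham_alternator_py_alt
  by_cases h : x < y
  · simp only [h, decide_true, if_pos]
    exact pvLoop_main true y x n (by omega)
  · simp only [h, decide_false, if_neg, Bool.false_eq_true, not_false_eq_true]
    exact pvLoop_main false x y n (by omega)
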